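-- pv_equiv track=rewrite | github.com/Melchioretto/pife-IAR | dominou_Main.py | encontrar_cobra_inicial
-- ===== SOURCE A (Python) =====
-- from typing import List, Tuple
--
-- Peca = Tuple[int, int]
--
-- def encontrar_cobra_inicial(pecas_computador: List[Peca], pecas_jogador: List[Peca]) -> Peca:
--     todas_pecas = pecas_computador + pecas_jogador
--     peca_inicial = max((peca for peca in todas_pecas if peca[0] == peca[1]), key=lambda x: x[0], default=None)
--     if peca_inicial is None:
--         peca_inicial = max(todas_pecas, key=lambda x: x[0] + x[1])
--
--     if peca_inicial in pecas_computador: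
--         pecas_computador.remove(peca_inicial)
--     else:
--         pecas_jogador.remove(peca_inicial)
--     return peca_inicial
-- ===== SOURCE B (Python) =====
-- def encontrar_cobra_inicial(pecas_computador, pecas_jogador):
--     # Sort-then-pick with ONE combined criterion: stable descending sort of all
--     # pieces by the lexicographic key (is_double, pip_sum), then take the head.
--     # Correct because a double's pip sum is 2*value (so among doubles the sum
--     # orders them exactly by value), doubles outrank non-doubles via the first
--     # key component, and the stable reverse sort keeps the first of tied pieces
--     # in front, matching max()'s first-wins rule.
--     todas_pecas = pecas_computador + pecas_jogador
--     ordenadas = sorted(todas_pecas,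
--                        key=lambda p: (p[0] == p[1], p[0] + p[1]),
--                        reverse=True)
--     peca_inicial = ordenadas[0]
--     if peca_inicial in pecas_computador:
--         pecas_computador.remove(peca_inicial)
--     else:
--         pecas_jogador.remove(peca_inicial)
--     return peca_inicial
-- ===== Notes on version B (the rewrite author's own statement) =====
-- stated objective: alternative
-- what changed: Replaces A's filter-doubles + two max() passes by a stable descending sort of all pieces under one combined lexicographic key (is_double, pip_sum) and taking the head; correct since a double's sum is twice its value and doubles outrank non-doubles on the first key component.
import Mathlib
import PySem

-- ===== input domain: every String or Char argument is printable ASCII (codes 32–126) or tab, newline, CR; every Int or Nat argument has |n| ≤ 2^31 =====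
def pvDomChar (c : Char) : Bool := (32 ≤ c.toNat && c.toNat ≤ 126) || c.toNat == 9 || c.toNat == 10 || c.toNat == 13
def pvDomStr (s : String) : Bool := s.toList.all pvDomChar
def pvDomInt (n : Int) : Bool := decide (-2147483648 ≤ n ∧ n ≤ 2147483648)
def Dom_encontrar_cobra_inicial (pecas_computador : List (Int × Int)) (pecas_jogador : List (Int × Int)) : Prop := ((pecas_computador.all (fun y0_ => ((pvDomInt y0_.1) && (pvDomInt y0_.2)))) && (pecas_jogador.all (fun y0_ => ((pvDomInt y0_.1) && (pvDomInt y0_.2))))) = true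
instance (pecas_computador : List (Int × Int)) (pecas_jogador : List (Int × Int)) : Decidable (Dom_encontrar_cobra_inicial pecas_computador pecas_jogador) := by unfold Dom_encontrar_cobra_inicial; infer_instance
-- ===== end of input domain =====

-- B replaces A's filter-doubles + two max() passes by ONE stable descending sort under the
-- combined lexicographic key (is_double, pip_sum) and taking the head; equivalence is about the
-- return value (both Pythons perform the same in-place removal of the returned piece).

-- ===== PORT A =====
def encontrar_cobra_inicial (pecas_computador : List (Int × Int)) (pecas_jogador : List (Int × Int)) : Int × Int :=
  let todas_pecas := pecas_computador ++ pecas_jogador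
  match PySem.List.max? (todas_pecas.filter (fun peca => peca.1 == peca.2)) (fun x => x.1) with
  | some peca_inicial => peca_inicial
  | none => (PySem.List.max? todas_pecas (fun x => x.1 + x.2)).getD (0, 0)  -- none = ValueError, excluded by Pre_

-- ===== PORT B =====
-- B's sort key, ported by name: Python's bool key component compares as the int 1/0
def pvK1 (p : Int × Int) : Int := if p.1 == p.2 then 1 else 0
def pvK2 (p : Int × Int) : Int := p.1 + p.2

def encontrar_cobra_inicial_alt (pecas_computador : List (Int × Int)) (pecas_jogador : List (Int × Int)) : Int × Int :=
  let todas_pecas := pecas_computador ++ pecas_jogador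
  -- sorted(todas_pecas, key=lambda p: (p[0] == p[1], p[0] + p[1]), reverse=True)
  let ordenadas := PySem.List.sorted2 todas_pecas pvK1 pvK2 true
  (PySem.List.pyGet? ordenadas 0).getD (0, 0)  -- none = IndexError on empty input, excluded by Pre_

-- ===== PRECONDITION & SPEC =====
-- Pre_ excludes only the input where both lists are empty: Python A raises ValueError (max of an
-- empty sequence) there, and B raises IndexError there as well.
def Pre_encontrar_cobra_inicial (pecas_computador : List (Int × Int)) (pecas_jogador : List (Int × Int)) : Prop :=
  pecas_computador ++ pecas_jogador ≠ []
instance (pecas_computador : List (Int × Int)) (pecas_jogador : List (Int × Int)) : Decidable (Pre_encontrar_cobra_inicial pecas_computador pecas_jogador) := by unfold Pre_encontrar_cobra_inicial; infer_instance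

def pvWitness_encontrar_cobra_inicial : (List (Int × Int)) × (List (Int × Int)) := ([(2, 2), (1, 5)], [(3, 4)])

def Spec_encontrar_cobra_inicial (pecas_computador : List (Int × Int)) (pecas_jogador : List (Int × Int)) (out : Int × Int) : Prop := out = encontrar_cobra_inicial_alt pecas_computador pecas_jogador
instance (pecas_computador : List (Int × Int)) (pecas_jogador : List (Int × Int)) (out : Int × Int) : Decidable (Spec_encontrar_cobra_inicial pecas_computador pecas_jogador out) := by unfold Spec_encontrar_cobra_inicial; infer_instance

-- ===== CLAIM (what is proved, stated in full; the proofs are below) =====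
def Claim_equal_encontrar_cobra_inicial : Prop := ∀ (pecas_computador : List (Int × Int)) (pecas_jogador : List (Int × Int)), Dom_encontrar_cobra_inicial pecas_computador pecas_jogador → Pre_encontrar_cobra_inicial pecas_computador pecas_jogador → Spec_encontrar_cobra_inicial pecas_computador pecas_jogador (encontrar_cobra_inicial pecas_computador pecas_jogador)

-- ===== LEMMAS AND PROOFS =====

-- the head of an insertion built by repeated insertBy evolves exactly like a first-wins running max
lemma pv_head_insertBy (before : (Int × Int) → (Int × Int) → Bool) (x : Int × Int) (acc : List (Int × Int)) :
    (PySem.List.insertBy before x acc).head? =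
      match acc.head? with
      | none => some x
      | some m => if before x m then some x else some m := by
  cases acc with
  | nil => rfl
  | cons y ys => simp [PySem.List.insertBy]; split <;> simp

lemma pv_head_foldl_insertBy (before : (Int × Int) → (Int × Int) → Bool)
    (xs : List (Int × Int)) (acc : List (Int × Int)) :
    (xs.foldl (fun acc x => PySem.List.insertBy before x acc) acc).head? =
      xs.foldl (fun h x =>
        match h with
        | none => some x
        | some m => if before x m then some x else some m) acc.head? := by
  induction xs generalizing acc with
  | nil => rfl
  | cons x t ih => simp only [List.foldl_cons, ih, pv_head_insertBy]

-- head of the reverse stable sort = first-wins lexicographic running max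
lemma pv_sorted2_head (xs : List (Int × Int)) :
    (PySem.List.sorted2 xs pvK1 pvK2 true).head? = PySem.List.max2? xs pvK1 pvK2 := by
  show (xs.foldl (fun acc x => PySem.List.insertBy _ x acc) []).head? = _
  rw [pv_head_foldl_insertBy]
  show List.foldl _ none xs = List.foldl _ none xs
  apply PySem.List.foldl_congr_mem
  intro acc x _
  cases acc <;> rfl

-- one fold step of max? / max2?, read off from a foldl over xs ++ [x]
lemma pv_max?_append (xs : List (Int × Int)) (key : (Int × Int) → Int) (x : Int × Int) :
    PySem.List.max? (xs ++ [x]) key =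
      match PySem.List.max? xs key with
      | none => some x
      | some m => if key m < key x then some x else some m := by
  simp only [PySem.List.max?, List.foldl_append, List.foldl_cons, List.foldl_nil]
  split <;> (rename_i h; rw [h])

lemma pv_max2?_append (xs : List (Int × Int)) (x : Int × Int) :
    PySem.List.max2? (xs ++ [x]) pvK1 pvK2 =
      match PySem.List.max2? xs pvK1 pvK2 with
      | none => some x
      | some m =>
        if (decide (pvK1 m < pvK1 x) || (!decide (pvK1 x < pvK1 m) && decide (pvK2 m < pvK2 x))) = true
        then some x else some m := by
  simp only [PySem.List.max2?, List.foldl_append, List.foldl_cons, List.foldl_nil]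
  split <;> (rename_i h; rw [h])

-- indexing the head
lemma pv_pyGet?_zero (l : List (Int × Int)) : PySem.List.pyGet? l 0 = l.head? := by
  cases l <;> simp [PySem.List.pyGet?, PySem.List.pyIdx?]

-- main invariant: the lexicographic running max decomposes into A's two-stage max
lemma pv_main (xs : List (Int × Int)) :
    PySem.List.max2? xs pvK1 pvK2 =
      match PySem.List.max? (xs.filter (fun p => p.1 == p.2)) (fun p => p.1) with
      | some d => some d
      | none => PySem.List.max? xs (fun p => p.1 + p.2) := by
  induction xs using List.reverseRecOn with
  | nil => rfl
  | append_singleton t x ih =>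
    rw [pv_max2?_append, ih, List.filter_append, pv_max?_append (key := fun p => p.1 + p.2)]
    by_cases hx : x.1 = x.2
    · have hfx : List.filter (fun p => p.1 == p.2) [x] = [x] := by simp [hx]
      rw [hfx, pv_max?_append (key := fun p => p.1)]
      cases hd : PySem.List.max? (t.filter (fun p => p.1 == p.2)) (fun p => p.1) with
      | some d =>
        have hdd : d.1 = d.2 := beq_iff_eq.mp (List.mem_filter.mp (PySem.List.max?_mem hd)).2
        have h1 : pvK1 d = 1 := by simp [pvK1, hdd]
        have h2 : pvK1 x = 1 := by simp [pvK1, hx]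
        have hiff : (pvK2 d < pvK2 x) ↔ d.1 < x.1 := by simp only [pvK2]; omega
        simp only [h1, h2]
        rw [show (decide ((1:Int) < 1) || (!decide ((1:Int) < 1) && decide (pvK2 d < pvK2 x)))
              = decide (d.1 < x.1) from by simp [hiff]]
        by_cases hlt : d.1 < x.1 <;> simp [hlt]
      | none =>
        have hnil : t.filter (fun p => p.1 == p.2) = [] :=
          (PySem.List.max?_eq_none_iff _ _).mp hd
        have hnd : ∀ p ∈ t, ¬ (p.1 = p.2) := by
          intro p hp hpe
          have : p ∈ t.filter (fun p => p.1 == p.2) := List.mem_filter.mpr ⟨hp, beq_iff_eq.mpr hpe⟩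
          simp [hnil] at this
        cases hs : PySem.List.max? t (fun p => p.1 + p.2) with
        | none => rfl
        | some m =>
          have h0 : pvK1 m = 0 := by simp [pvK1, hnd m (PySem.List.max?_mem hs)]
          have h2 : pvK1 x = 1 := by simp [pvK1, hx]
          simp [h0, h2]
    · have hfx : List.filter (fun p => p.1 == p.2) [x] = [] := by simp [hx]
      rw [hfx, List.append_nil]
      cases hd : PySem.List.max? (t.filter (fun p => p.1 == p.2)) (fun p => p.1) with
      | some d =>
        have hdd : d.1 = d.2 := beq_iff_eq.mp (List.mem_filter.mp (PySem.List.max?_mem hd)).2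
        have h1 : pvK1 d = 1 := by simp [pvK1, hdd]
        have h0 : pvK1 x = 0 := by simp [pvK1, hx]
        simp [h1, h0]
      | none =>
        have hnil : t.filter (fun p => p.1 == p.2) = [] :=
          (PySem.List.max?_eq_none_iff _ _).mp hd
        have hnd : ∀ p ∈ t, ¬ (p.1 = p.2) := by
          intro p hp hpe
          have : p ∈ t.filter (fun p => p.1 == p.2) := List.mem_filter.mpr ⟨hp, beq_iff_eq.mpr hpe⟩
          simp [hnil] at this
        cases hs : PySem.List.max? t (fun p => p.1 + p.2) with
        | none => rfl
        | some m =>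
          have h0m : pvK1 m = 0 := by simp [pvK1, hnd m (PySem.List.max?_mem hs)]
          have h0x : pvK1 x = 0 := by simp [pvK1, hx]
          simp [pvK2, h0m, h0x]

-- ===== VERDICT (by name: the statement is the Claim_ definition above) =====
theorem encontrar_cobra_inicial_spec : Claim_equal_encontrar_cobra_inicial := by
  intro pc pj _ _
  unfold Spec_encontrar_cobra_inicial encontrar_cobra_inicial encontrar_cobra_inicial_alt
  simp only [pv_pyGet?_zero, pv_sorted2_head, pv_main]
  cases h : PySem.List.max? ((pc ++ pj).filter (fun p => p.1 == p.2)) (fun p => p.1) <;> simp
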